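-- pv_equiv track=rewrite | github.com/LindgeW/MetaAug4NER | utils/tag_util.py | bi2bies
-- ===== SOURCE A (Python) =====
-- def bi2bies(bi_tags):
--     tag_len = len(bi_tags)
--     for i, t in enumerate(bi_tags):
--         if t == 'B':
--             if i + 1 == tag_len or 'I' != bi_tags[i+1]:
--                 bi_tags[i] = 'S'
--         elif t == 'I':
--             if i + 1 == tag_len or 'I' != bi_tags[i+1]:
--                 bi_tags[i] = 'E'
--     return bi_tags
-- ===== SOURCE B (Python) =====
-- def bi2bies(bi_tags):
--     # Right-to-left pass carrying one boolean ("is the next tag 'I'?"),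
--     # building the converted sequence with append + final reverse; no lookahead
--     # indexing into the list is needed. Splices back so the argument is mutated
--     # in place like the original.
--     out = []
--     next_is_I = False
--     for t in reversed(bi_tags):
--         if t == 'B' and not next_is_I:
--             out.append('S')
--         elif t == 'I' and not next_is_I:
--             out.append('E')
--         else:
--             out.append(t)
--         next_is_I = (t == 'I')
--     out.reverse()
--     bi_tags[:] = out
--     return bi_tags
-- ===== Notes on version B (the rewrite author's own statement) =====
-- stated objective: alternative
-- what changed: Replaces the forward index loop that mutates entries while peeking at bi_tags[i+1] with a right-to-left fold carrying a single boolean state (whether the successor is 'I'), building the result with append and a final reverse, so no positional lookahead indexing exists at all.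
import Mathlib
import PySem

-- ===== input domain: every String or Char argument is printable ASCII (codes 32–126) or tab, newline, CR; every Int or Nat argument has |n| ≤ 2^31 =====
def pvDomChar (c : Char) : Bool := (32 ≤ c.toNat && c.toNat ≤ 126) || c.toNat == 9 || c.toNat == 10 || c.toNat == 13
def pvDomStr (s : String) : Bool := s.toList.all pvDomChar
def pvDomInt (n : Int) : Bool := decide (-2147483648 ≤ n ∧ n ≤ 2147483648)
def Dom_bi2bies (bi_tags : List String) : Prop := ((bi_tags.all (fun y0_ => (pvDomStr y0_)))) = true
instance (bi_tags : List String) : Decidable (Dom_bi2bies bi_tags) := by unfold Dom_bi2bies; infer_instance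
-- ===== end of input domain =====

-- B converts right-to-left carrying one boolean ("next tag is 'I'?") instead of A's forward
-- index loop peeking at bi_tags[i+1] (objective: alternative). Both Pythons mutate the
-- argument in place; the equivalence proved is about the return value.

-- ===== PORT A =====
-- the loop body of A: i-th iteration of 'for i, t in enumerate(bi_tags)' on the live list
def bi2biesStepA (tagLen : Int) (acc : List String) (i : Int) : List String :=
  let t := PySem.List.pyGetD acc i ""
  if t = "B" then
    if i + 1 = tagLen ∨ "I" ≠ PySem.List.pyGetD acc (i + 1) "" then
      PySem.List.pySetD acc i "S"
    else acc
  else if t = "I" then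
    if i + 1 = tagLen ∨ "I" ≠ PySem.List.pyGetD acc (i + 1) "" then
      PySem.List.pySetD acc i "E"
    else acc
  else acc

def bi2bies (bi_tags : List String) : List String :=
  let tag_len : Int := (bi_tags.length : Int)
  (PySem.List.pyRange 0 tag_len 1).foldl (bi2biesStepA tag_len) bi_tags

-- ===== PORT B =====
-- the loop body of B: state is (out so far, next_is_I); out gets the converted tag appended
def bi2biesStepB (st : List String × Bool) (t : String) : List String × Bool :=
  let out :=
    if t = "B" ∧ st.2 = false then st.1 ++ ["S"]
    else if t = "I" ∧ st.2 = false then st.1 ++ ["E"]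
    else st.1 ++ [t]
  (out, decide (t = "I"))

def bi2bies_alt (bi_tags : List String) : List String :=
  ((bi_tags.reverse).foldl bi2biesStepB ([], false)).1.reverse

-- ===== PRECONDITION & SPEC =====
def Spec_bi2bies (bi_tags : List String) (out : List String) : Prop := out = bi2bies_alt bi_tags
instance (bi_tags : List String) (out : List String) : Decidable (Spec_bi2bies bi_tags out) := by unfold Spec_bi2bies; infer_instance

-- ===== CLAIM (what is proved, stated in full; the proofs are below) =====
def Claim_equal_bi2bies : Prop := ∀ (bi_tags : List String), Dom_bi2bies bi_tags → Spec_bi2bies bi_tags (bi2bies bi_tags)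

-- ===== LEMMAS AND PROOFS =====

-- proof-internal normal form: each tag stepped with its successor ('' past the end)
def zmStep (p : String × String) : String :=
  if p.1 = "B" then (if p.2 ≠ "I" then "S" else p.1)
  else if p.1 = "I" then (if p.2 ≠ "I" then "E" else p.1)
  else p.1

def zm (l : List String) : List String := (l.zip (l.tail ++ [""])).map zmStep

theorem zm_cons (t : String) (rest : List String) :
    zm (t :: rest) = zmStep (t, rest.headD "") :: zm rest := by
  cases rest <;> simp [zm, List.zip]

-- one iteration of A's loop at the head of the unprocessed suffix equals the normal-form step
theorem bi2bies_stepA_at (pre : List String) (t : String) (rest : List String) :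
    bi2biesStepA (((pre.length + (t :: rest).length : Nat) : Int)) (pre ++ t :: rest) ((pre.length : Nat) : Int)
      = pre ++ zmStep (t, rest.headD "") :: rest := by
  have hget : PySem.List.pyGetD (pre ++ t :: rest) ((pre.length : Nat) : Int) "" = t := by simp
  cases rest with
  | nil =>
    have hc : ((pre.length : Nat) : Int) + 1 = ((pre.length + ([t] : List String).length : Nat) : Int) := by
      push_cast; simp
    unfold bi2biesStepA zmStep
    rw [hget]
    by_cases hB : t = "B"
    · rw [if_pos hB, if_pos (Or.inl hc)]; simp [hB]
    · rw [if_neg hB]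
      by_cases hI : t = "I"
      · rw [if_pos hI, if_pos (Or.inl hc)]; simp [hI]
      · simp [hB, hI]
  | cons r rs =>
    have hget1 : PySem.List.pyGetD (pre ++ t :: r :: rs) (((pre.length : Nat) : Int) + 1) "" = r := by
      have h : ((pre.length : Nat) : Int) + 1 = ((pre.length + 1 : Nat) : Int) := by push_cast; ring
      rw [h, PySem.List.pyGetD_natCast]
      simp [List.getD]
    have hc : (((pre.length : Nat) : Int) + 1 = ((pre.length + (t :: r :: rs).length : Nat) : Int)
          ∨ "I" ≠ PySem.List.pyGetD (pre ++ t :: r :: rs) (((pre.length : Nat) : Int) + 1) "")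
        ↔ ¬ r = "I" := by
      rw [hget1]
      constructor
      · rintro (h | h)
        · exfalso; simp only [List.length_cons] at h; push_cast at h; omega
        · exact fun hr => h hr.symm
      · intro h; exact Or.inr (fun hr => h hr.symm)
    unfold bi2biesStepA zmStep
    rw [hget]
    by_cases hB : t = "B"
    · rw [if_pos hB]
      by_cases hr : r = "I"
      · rw [if_neg (fun h => (hc.mp h) hr)]; simp [hB, hr]
      · rw [if_pos (hc.mpr hr)]; simp [hB, hr]
    · rw [if_neg hB]
      by_cases hI : t = "I"
      · rw [if_pos hI]
        by_cases hr : r = "I"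
        · rw [if_neg (fun h => (hc.mp h) hr)]; simp [hI, hr]
        · rw [if_pos (hc.mpr hr)]; simp [hI, hr]
      · rw [if_neg hI]; simp [hB, hI]

-- A's loop invariant: with the prefix already processed, the remaining iterations rewrite the suffix
theorem bi2bies_loop (suf : List String) : ∀ (pre : List String),
    (PySem.List.pyRange (pre.length : Int) ((pre.length + suf.length : Nat) : Int) 1).foldl
        (bi2biesStepA ((pre.length + suf.length : Nat) : Int)) (pre ++ suf)
      = pre ++ zm suf := by
  induction suf with
  | nil => intro pre; simp [PySem.List.pyRange_one_eq_nil, zm]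
  | cons t rest ih =>
    intro pre
    have hlt : ((pre.length : Nat) : Int) < ((pre.length + (t :: rest).length : Nat) : Int) := by
      simp only [List.length_cons]; push_cast; omega
    rw [PySem.List.pyRange_one_cons hlt, List.foldl_cons, bi2bies_stepA_at]
    have hlen : ((pre.length : Nat) : Int) + 1
        = (((pre ++ [zmStep (t, rest.headD "")]).length : Nat) : Int) := by simp
    have hN : ((pre.length + (t :: rest).length : Nat) : Int)
        = (((pre ++ [zmStep (t, rest.headD "")]).length + rest.length : Nat) : Int) := by
      simp; omega
    rw [hlen, hN]
    have := ih (pre ++ [zmStep (t, rest.headD "")])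
    simp only [List.append_assoc, List.singleton_append] at this
    rw [this, zm_cons]

theorem bi2bies_eq_zm (l : List String) : bi2bies l = zm l := by
  have h := bi2bies_loop l []
  simpa using h

-- B's fold invariant: after consuming the reversed list, out holds (zm l).reverse and
-- the boolean records whether the head of the remaining (= whole) list is "I"
theorem bi2bies_alt_inv (l : List String) :
    (l.reverse).foldl bi2biesStepB ([], false) = ((zm l).reverse, decide (l.headD "" = "I")) := by
  induction l with
  | nil => simp [zm]
  | cons t rest ih =>
    rw [List.reverse_cons, List.foldl_append, ih, List.foldl_cons, List.foldl_nil, zm_cons]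
    unfold bi2biesStepB zmStep
    by_cases hB : t = "B" <;> by_cases hI : t = "I" <;>
      by_cases hr : rest.headD "" = "I" <;>
      simp [hB, hI] <;> split_ifs <;> simp_all

theorem bi2bies_alt_eq_zm (l : List String) : bi2bies_alt l = zm l := by
  unfold bi2bies_alt
  rw [bi2bies_alt_inv]
  simp

-- ===== VERDICT (by name: the statement is the Claim_ definition above) =====
theorem bi2bies_spec : Claim_equal_bi2bies := by
  intro bi_tags _
  unfold Spec_bi2bies
  rw [bi2bies_eq_zm, bi2bies_alt_eq_zm]
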